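-- pv_equiv track=rewrite | github.com/dennisjackson/heliotorrent | util.py | get_data_tile_paths
-- ===== SOURCE A (Python) =====
-- import math
-- from typing import Generator, List, Optional, Tuple
--
-- TILE_SIZE = 256
--
-- def int_to_parts(tile_number: int) -> List[str]:
--     """
--     Convert an integer tile number to path parts.
--
--     Args:
--         tile_number: The tile number to convert
--
--     Returns:
--         A list of string parts representing the path components
--     """
--     # Pad the number to a multiple of 3 digits
--     tile_str = str(tile_number).zfill(((len(str(tile_number)) + 2) // 3) * 3)
--     # Split into groups of 3 digits
--     parts = [f"{tile_str[j : j + 3]}" for j in range(0, len(tile_str), 3)]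
--     # Prefix all but the last part with 'x'
--     parts = [f"x{x}" for x in parts[:-1]] + [parts[-1]]
--     return parts
--
-- def paths_in_level(
--     start_tile: int, end_tile: int, tree_size: int, partials: int = 0
-- ) -> Generator[str, None, None]:
--     """
--     Generate paths for tiles in a specific level.
--
--     Args:
--         start_tile: First tile to include
--         end_tile: Last tile to include (exclusive)
--         tree_size: Total size of the tree
--         partials: Number of partial entries (0 for none)
--
--     Yields:
--         Path strings for each tile
--     """
--     # Generate paths for complete tiles
--     for i in range(start_tile, min(end_tile, tree_size)):
--         parts = int_to_parts(i)
--         yield "/".join(parts)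
--
--     # Generate path for partial tile if needed
--     if partials:
--         parts = int_to_parts(tree_size)
--         parts[-1] += ".p"  # Mark as partial
--         parts += [str(partials)]
--         yield "/".join(parts)
--
-- def get_data_tile_paths(
--     start_entry: int, end_entry: int, tree_size: int, compressed: bool = False
-- ) -> Generator[str, None, None]:
--     """
--     Generate paths for data tiles.
--
--     Args:
--         start_entry: First entry to include
--         end_entry: Last entry to include
--         tree_size: Total size of the tree
--         compressed: Whether to use compressed data paths
--
--     Yields:
--         Path strings for each data tile
--     """
--     start_entry //= TILE_SIZE
--     end_entry = math.ceil(end_entry / TILE_SIZE)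
--     tree_size //= TILE_SIZE
--
--     prefix = "tile/compressed_data" if compressed else "tile/data"
--     yield from (
--         f"{prefix}/{x}" for x in paths_in_level(start_entry, end_entry, tree_size)
--     )
-- ===== SOURCE B (Python) =====
-- TILE_SIZE = 256
--
--
-- def get_data_tile_paths(start_entry, end_entry, tree_size, compressed=False):
--     """Same paths as A, built in one loop: each tile's path is assembled
--     back-to-front by peeling 3-digit groups off the right of str(n)."""
--     prefix = "tile/compressed_data/" if compressed else "tile/data/"
--     lo = start_entry // TILE_SIZE
--     hi = min(-(-end_entry // TILE_SIZE), tree_size // TILE_SIZE)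
--     out = []
--     for n in range(lo, hi):
--         digits = str(n)
--         path = digits[-3:].zfill(3)
--         digits = digits[:-3]
--         while digits:
--             path = "x" + digits[-3:].zfill(3) + "/" + path
--             digits = digits[:-3]
--         out.append(prefix + path)
--     return out
-- ===== Notes on version B (the rewrite author's own statement) =====
-- stated objective: simpler
-- what changed: B emits each tile path in one streaming loop that builds the path back-to-front by repeatedly peeling the last 3-digit group off str(n), replacing A's helper pipeline of zfill-to-a-multiple-of-3, forward index slicing, x-prefix mapping of all but the last part, and '/'-join.
import Mathlib
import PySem

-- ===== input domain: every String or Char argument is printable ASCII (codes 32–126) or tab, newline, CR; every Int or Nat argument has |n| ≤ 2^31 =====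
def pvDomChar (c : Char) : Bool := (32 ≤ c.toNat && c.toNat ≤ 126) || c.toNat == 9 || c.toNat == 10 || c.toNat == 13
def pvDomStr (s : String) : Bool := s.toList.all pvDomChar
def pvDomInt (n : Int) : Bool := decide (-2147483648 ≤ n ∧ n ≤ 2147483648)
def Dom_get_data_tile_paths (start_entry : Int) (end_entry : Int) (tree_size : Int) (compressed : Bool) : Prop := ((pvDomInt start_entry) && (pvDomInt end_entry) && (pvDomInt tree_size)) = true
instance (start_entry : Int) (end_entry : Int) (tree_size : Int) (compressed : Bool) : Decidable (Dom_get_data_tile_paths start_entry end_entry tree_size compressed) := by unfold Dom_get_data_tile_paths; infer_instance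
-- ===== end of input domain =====

-- B builds each tile path in one loop, peeling 3-digit groups off the right of str(n)
-- back-to-front, instead of A's zfill-to-a-multiple-of-3 + forward slicing + join (objective: simpler).

-- ===== PORT A =====
def TILE_SIZE : Int := 256

def int_to_parts (tile_number : Int) : List String :=
  let s := PySem.Int.toStr tile_number
  let tile_str := PySem.Str.zfill s ((PySem.Int.floordiv (PySem.Str.len s + 2) 3) * 3)
  let parts := (PySem.List.pyRange 0 (PySem.Str.len tile_str) 3).map
      (fun j => PySem.Str.slice tile_str (some j) (some (j + 3)))
  -- parts[:-1] prefixed with 'x', plus parts[-1]; parts is provably nonempty, so the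
  -- IndexError default "" of parts[-1] is unreachable
  (PySem.List.slice parts none (some (-1))).map (fun x => "x" ++ x) ++
    [(PySem.List.pyGet? parts (-1)).getD ""]

def paths_in_level (start_tile : Int) (end_tile : Int) (tree_size : Int) (partials : Int) : List String :=
  let complete := (PySem.List.pyRange start_tile (min end_tile tree_size) 1).map
      (fun i => PySem.Str.join "/" (int_to_parts i))
  if partials ≠ 0 then
    let parts := int_to_parts tree_size
    -- parts[-1] += ".p": rewrite the last element in place (parts is provably nonempty)
    let parts := parts.dropLast ++ [((PySem.List.pyGet? parts (-1)).getD "") ++ ".p"]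
    let parts := parts ++ [PySem.Int.toStr partials]
    complete ++ [PySem.Str.join "/" parts]
  else complete

def get_data_tile_paths (start_entry : Int) (end_entry : Int) (tree_size : Int) (compressed : Bool) : List String :=
  let start_entry := PySem.Int.floordiv start_entry TILE_SIZE
  -- math.ceil(end_entry / TILE_SIZE): exact as ceiling division for |end_entry| ≤ 2^31
  let end_entry := -(PySem.Int.floordiv (-end_entry) TILE_SIZE)
  let tree_size := PySem.Int.floordiv tree_size TILE_SIZE
  let pfx := if compressed then "tile/compressed_data" else "tile/data"
  (paths_in_level start_entry end_entry tree_size 0).map (fun x => pfx ++ "/" ++ x)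

-- ===== PORT B =====
-- B's inner while loop: while digits: path = "x" + digits[-3:].zfill(3) + "/" + path; digits = digits[:-3]
def bBuild (digits : List Char) (path : List Char) : List Char :=
  if h : digits = [] then path
  else bBuild (PySem.Chars.slice digits none (some (-3)))
      ('x' :: PySem.Chars.zfill (PySem.Chars.slice digits (some (-3)) none) 3 ++ '/' :: path)
termination_by digits.length
decreasing_by
  simp only [PySem.Chars.slice_eq_listSlice, PySem.List.slice_to_neg_ofNat digits 3 (by omega),
    List.length_take]
  have : digits.length ≠ 0 := fun h0 => h (List.eq_nil_of_length_eq_zero h0)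
  omega

def get_data_tile_paths_alt (start_entry : Int) (end_entry : Int) (tree_size : Int) (compressed : Bool) : List String :=
  let pre := if compressed then "tile/compressed_data/" else "tile/data/"
  let lo := PySem.Int.floordiv start_entry 256
  let hi := min (-(PySem.Int.floordiv (-end_entry) 256)) (PySem.Int.floordiv tree_size 256)
  (PySem.List.pyRange lo hi 1).map (fun n =>
    let digits := PySem.Int.toChars n
    String.ofList (pre.toList ++
      bBuild (PySem.Chars.slice digits none (some (-3)))
        (PySem.Chars.zfill (PySem.Chars.slice digits (some (-3)) none) 3)))

-- ===== PRECONDITION & SPEC =====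
def Spec_get_data_tile_paths (start_entry : Int) (end_entry : Int) (tree_size : Int) (compressed : Bool) (out : List String) : Prop := out = get_data_tile_paths_alt start_entry end_entry tree_size compressed
instance (start_entry : Int) (end_entry : Int) (tree_size : Int) (compressed : Bool) (out : List String) : Decidable (Spec_get_data_tile_paths start_entry end_entry tree_size compressed out) := by unfold Spec_get_data_tile_paths; infer_instance

-- ===== CLAIM (what is proved, stated in full; the proofs are below) =====
def Claim_equal_get_data_tile_paths : Prop := ∀ (start_entry : Int) (end_entry : Int) (tree_size : Int) (compressed : Bool), Dom_get_data_tile_paths start_entry end_entry tree_size compressed → Spec_get_data_tile_paths start_entry end_entry tree_size compressed (get_data_tile_paths start_entry end_entry tree_size compressed)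

-- ===== LEMMAS AND PROOFS =====

-- the padded width A uses: ((len + 2) // 3) * 3
def padW (L : Nat) : Nat := (L + 2) / 3 * 3

-- forward chunks of 3 characters (what A's slice comprehension produces)
def chunks3 (cs : List Char) : List (List Char) :=
  if cs = [] then [] else cs.take 3 :: chunks3 (cs.drop 3)
termination_by cs.length
decreasing_by
  simp only [List.length_drop]
  have : cs.length ≠ 0 := fun h0 => (by assumption : ¬ cs = []) (List.eq_nil_of_length_eq_zero h0)
  omega

-- the same groups, built from the right, each zfilled to width 3 (B's view of A's parts)
def rgroups (cs : List Char) : List (List Char) :=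
  if cs.length ≤ 3 then [PySem.Chars.zfill cs 3]
  else rgroups (cs.take (cs.length - 3)) ++ [cs.drop (cs.length - 3)]
termination_by cs.length
decreasing_by simp only [List.length_take]; omega

-- flattened "x<group>/" blocks of all groups of ds, from the right
def flatR (ds : List Char) : List Char :=
  if ds = [] then [] else
    flatR (ds.take (ds.length - 3)) ++
      ('x' :: PySem.Chars.zfill (ds.drop (ds.length - 3)) 3 ++ ['/'])
termination_by ds.length
decreasing_by
  simp only [List.length_take]
  have : ds.length ≠ 0 := fun h0 => (by assumption : ¬ ds = []) (List.eq_nil_of_length_eq_zero h0)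
  omega

theorem zfill_of_le (cs : List Char) (w : Int) (h : w ≤ cs.length) :
    PySem.Chars.zfill cs w = cs := by
  unfold PySem.Chars.zfill; simp [h]

theorem zfill_pos (c : Char) (rest : List Char) (w : Nat) (h : rest.length + 1 < w) :
    PySem.Chars.zfill (c :: rest) w =
      if c = '+' ∨ c = '-' then c :: (List.replicate (w - (rest.length + 1)) '0' ++ rest)
      else List.replicate (w - (rest.length + 1)) '0' ++ (c :: rest) := by
  unfold PySem.Chars.zfill
  rw [if_neg (by simp; omega)]
  simp [Int.toNat_natCast]

-- peeling the last 3 characters off commutes with A's left zfill padding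
theorem zfill_step (cs : List Char) (h : 3 < cs.length) :
    PySem.Chars.zfill cs (padW cs.length) =
      PySem.Chars.zfill (cs.take (cs.length - 3)) (padW (cs.length - 3)) ++
        cs.drop (cs.length - 3) := by
  by_cases hm : cs.length % 3 = 0
  · have h1 : padW cs.length = cs.length := by unfold padW; omega
    have h2 : padW (cs.length - 3) = cs.length - 3 := by unfold padW; omega
    rw [h1, h2, zfill_of_le cs _ (by omega),
      zfill_of_le _ _ (by simp [List.length_take]; try omega), List.take_append_drop]
  · cases cs with
    | nil => simp at h
    | cons c rest =>
      have hL : (c :: rest).length = rest.length + 1 := by simp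
      have hm' : (rest.length + 1) % 3 ≠ 0 := by simpa using hm
      have h' : 3 ≤ rest.length := by simp at h; omega
      have htk : (c :: rest).take ((c :: rest).length - 3) = c :: rest.take (rest.length - 3) := by
        rw [show (c :: rest).length - 3 = (rest.length - 3) + 1 by simp; omega]
        simp [List.take_succ_cons]
      have hdr : (c :: rest).drop ((c :: rest).length - 3) = rest.drop (rest.length - 3) := by
        rw [show (c :: rest).length - 3 = (rest.length - 3) + 1 by simp; omega]
        simp [List.drop_succ_cons]
      rw [htk, hdr, zfill_pos c rest _ (by unfold padW; simp; omega),
        zfill_pos c (rest.take (rest.length - 3)) _ (by unfold padW; simp [List.length_take]; omega)]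
      have hk : padW (c :: rest).length - (rest.length + 1)
          = padW ((c :: rest).length - 3) - ((rest.take (rest.length - 3)).length + 1) := by
        simp only [List.length_take]; unfold padW; omega
      rw [hk]
      by_cases hc : c = '+' ∨ c = '-'
      · rw [if_pos hc, if_pos hc]
        simp [List.append_assoc]
        try rw [List.take_append_drop]
      · rw [if_neg hc, if_neg hc]
        simp [List.append_assoc]
        try rw [List.take_append_drop]

theorem length_zfill_padW (cs : List Char) :
    (PySem.Chars.zfill cs (padW cs.length)).length = padW cs.length := by
  rw [PySem.Chars.length_zfill]
  have : cs.length ≤ padW cs.length := by unfold padW; omega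
  simp [Int.toNat_natCast]
  omega

theorem chunks3_nil : chunks3 [] = [] := by unfold chunks3; simp

theorem chunks3_ne (cs : List Char) (h : cs ≠ []) :
    chunks3 cs = cs.take 3 :: chunks3 (cs.drop 3) := by
  conv_lhs => rw [chunks3]
  rw [if_neg h]

theorem chunks3_of_length_3 (cs : List Char) (h : cs.length = 3) : chunks3 cs = [cs] := by
  have hne : cs ≠ [] := by intro h0; simp [h0] at h
  rw [chunks3_ne cs hne, List.take_of_length_le (by omega), List.drop_eq_nil_of_le (by omega),
    chunks3_nil]

theorem chunks3_append3 (q t : List Char) (hq : q.length % 3 = 0) (ht : t ≠ []) :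
    chunks3 (q ++ t) = chunks3 q ++ chunks3 t := by
  by_cases h : q = []
  · simp [h, chunks3_nil]
  · have h3 : 3 ≤ q.length := by
      have : q.length ≠ 0 := fun h0 => h (List.eq_nil_of_length_eq_zero h0)
      omega
    rw [chunks3_ne (q ++ t) (by simp [h]), chunks3_ne q h,
      List.take_append_of_le_length h3, List.drop_append_of_le_length h3,
      chunks3_append3 (q.drop 3) t (by simp [List.length_drop]; omega) ht]
    simp
termination_by q.length
decreasing_by simp only [List.length_drop]; omega

-- A's zfilled string, chunked forward, is exactly the right-to-left groups
theorem chunks3_padded (cs : List Char) (h : cs ≠ []) :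
    chunks3 (PySem.Chars.zfill cs (padW cs.length)) = rgroups cs := by
  have hpos : 0 < cs.length := List.length_pos_iff.mpr h
  by_cases h3 : cs.length ≤ 3
  · rw [rgroups, if_pos h3]
    have hw : padW cs.length = 3 := by unfold padW; omega
    rw [hw, chunks3_of_length_3 _ (by rw [PySem.Chars.length_zfill]; simp; omega)]
    norm_cast
  · rw [rgroups, if_neg h3, zfill_step cs (by omega),
      chunks3_append3 _ _
        (by rw [PySem.Chars.length_zfill]; simp [List.length_take, Int.toNat_natCast]
            unfold padW; omega)
        (by simp [List.drop_eq_nil_iff]; omega)]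
    have hlt : (cs.take (cs.length - 3)).length = cs.length - 3 := by
      simp [List.length_take]
    rw [show padW (cs.length - 3) = padW (cs.take (cs.length - 3)).length by rw [hlt]]
    rw [chunks3_padded (cs.take (cs.length - 3))
        (by simp [List.ne_nil_iff_length_pos]; omega),
      chunks3_of_length_3 _ (by simp [List.length_drop]; omega)]
termination_by cs.length
decreasing_by simp only [List.length_take]; omega

theorem flatR_nil : flatR [] = [] := by unfold flatR; simp

theorem flatR_ne (ds : List Char) (h : ds ≠ []) :
    flatR ds = flatR (ds.take (ds.length - 3)) ++
      ('x' :: PySem.Chars.zfill (ds.drop (ds.length - 3)) 3 ++ ['/']) := by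
  conv_lhs => rw [flatR]
  rw [if_neg h]

theorem rgroups_ne_nil (cs : List Char) : rgroups cs ≠ [] := by
  unfold rgroups; split <;> simp

-- concatenating the 'x'-blocks of all right-to-left groups is flatR
theorem flat_rgroups (cs : List Char) (h : cs ≠ []) :
    (rgroups cs).flatMap (fun g => 'x' :: g ++ ['/']) = flatR cs := by
  have hpos : 0 < cs.length := List.length_pos_iff.mpr h
  by_cases h3 : cs.length ≤ 3
  · rw [rgroups, if_pos h3, flatR_ne cs h,
      List.take_eq_nil_iff.mpr (Or.inl (by omega)), flatR_nil,
      show cs.length - 3 = 0 by omega, List.drop_zero]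
    simp
  · rw [rgroups, if_neg h3, flatR_ne cs h, List.flatMap_append,
      flat_rgroups (cs.take (cs.length - 3))
        (by simp [List.ne_nil_iff_length_pos]; omega)]
    have hz : PySem.Chars.zfill (cs.drop (cs.length - 3)) 3 = cs.drop (cs.length - 3) :=
      zfill_of_le _ _ (by simp [List.length_drop]; omega)
    rw [hz]
    simp
termination_by cs.length
decreasing_by simp only [List.length_take]; omega

-- B's loop is flatR around the initial path
theorem bBuild_eq (ds path : List Char) : bBuild ds path = flatR ds ++ path := by
  by_cases h : ds = []
  · subst h
    rw [bBuild, flatR_nil]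
    simp
  · conv_lhs => rw [bBuild]
    rw [dif_neg h,
      show PySem.Chars.slice ds none (some (-3)) = ds.take (ds.length - 3) by
        simp only [PySem.Chars.slice_eq_listSlice]
        exact PySem.List.slice_to_neg_ofNat ds 3 (by omega),
      show PySem.Chars.slice ds (some (-3)) none = ds.drop (ds.length - 3) by
        simp only [PySem.Chars.slice_eq_listSlice]
        exact PySem.List.slice_from_neg_ofNat ds 3 (by omega),
      bBuild_eq (ds.take (ds.length - 3)), flatR_ne ds h]
    simp
termination_by ds.length
decreasing_by
  simp only [List.length_take]
  have : ds.length ≠ 0 := fun h0 => h (List.eq_nil_of_length_eq_zero h0)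
  omega

theorem join_map_x (gs : List (List Char)) (t : List Char) :
    PySem.Chars.join ['/'] (gs.map (fun g => 'x' :: g) ++ [t]) =
      gs.flatMap (fun g => 'x' :: g ++ ['/']) ++ t := by
  induction gs with
  | nil => simp [PySem.Chars.join_singleton]
  | cons g gs ih =>
    cases gs with
    | nil => simp [PySem.Chars.join_cons_cons, PySem.Chars.join_singleton]
    | cons g' gs' =>
      simp only [List.map_cons, List.cons_append, PySem.Chars.join_cons_cons] at ih ⊢
      rw [ih]
      simp

theorem toChars_ne_nil (n : Int) : PySem.Int.toChars n ≠ [] := by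
  unfold PySem.Int.toChars
  split <;> simp [List.ne_nil_iff_length_pos, Nat.length_toDigits_pos]

theorem pyGet_neg_one {α : Type} (xs : List α) (h : xs ≠ []) :
    PySem.List.pyGet? xs (-1) = xs.getLast? := by
  have hn : 0 < xs.length := List.length_pos_iff.mpr h
  simp [PySem.List.pyGet?, PySem.List.pyIdx?, List.getLast?_eq_getElem?,
    Nat.one_le_iff_ne_zero.mpr (Nat.pos_iff_ne_zero.mp hn)]

-- the tile numbers A slices at: range(0, 3*k, 3)
theorem pyRange03 (k : Nat) :
    PySem.List.pyRange 0 ((3 * k : Nat) : Int) 3 = (List.range k).map (fun i => ((3 * i : Nat) : Int)) := by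
  rw [PySem.List.pyRange_of_pos _ _ (by omega)]
  by_cases hk : k = 0
  · subst hk; simp
  · rw [if_pos (by push_cast; omega)]
    have hcount : ((((3 * k : Nat) : Int) - 0 + 3 - 1) / 3).toNat = k := by
      rw [show (((3 * k : Nat) : Int) - 0 + 3 - 1) = ((3 * k + 2 : Nat) : Int) by push_cast; ring,
        show (3 : Int) = ((3 : Nat) : Int) by norm_cast, ← Int.natCast_ediv,
        Int.toNat_natCast]
      omega
    rw [hcount]
    apply List.map_congr_left
    intro i _
    push_cast
    ring

-- the slice comprehension is forward chunking
theorem mapSlice_eq_chunks3 (k : Nat) (ds : List Char) (hlen : ds.length = 3 * k) :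
    (List.range k).map (fun i => (ds.drop (3 * i)).take 3) = chunks3 ds := by
  induction k generalizing ds with
  | zero =>
    have : ds = [] := List.eq_nil_of_length_eq_zero (by omega)
    simp [this, chunks3_nil]
  | succ k ih =>
    have hne : ds ≠ [] := by simp [List.ne_nil_iff_length_pos]; omega
    rw [List.range_succ_eq_map, List.map_cons, List.map_map, chunks3_ne ds hne]
    congr 1
    rw [← ih (ds.drop 3) (by simp [List.length_drop]; omega)]
    apply List.map_congr_left
    intro i _
    simp only [Function.comp_apply, List.drop_drop]
    congr 2
    omega

-- the joined parts of A = flatR of the head groups ++ the zfilled last group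
theorem AB_core (cs : List Char) (h : cs ≠ []) :
    (rgroups cs).dropLast.flatMap (fun g => 'x' :: g ++ ['/']) ++
        (rgroups cs).getLast (rgroups_ne_nil cs) =
      flatR (cs.take (cs.length - 3)) ++ PySem.Chars.zfill (cs.drop (cs.length - 3)) 3 := by
  have hpos : 0 < cs.length := List.length_pos_iff.mpr h
  by_cases h3 : cs.length ≤ 3
  · have : rgroups cs = [PySem.Chars.zfill cs 3] := by rw [rgroups, if_pos h3]
    simp only [this, List.dropLast_singleton, List.flatMap_nil, List.getLast_singleton,
      List.nil_append]
    rw [List.take_eq_nil_iff.mpr (Or.inl (by omega)), flatR_nil,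
      show cs.length - 3 = 0 by omega, List.drop_zero]
    simp
  · have hsplit : rgroups cs
        = rgroups (cs.take (cs.length - 3)) ++ [cs.drop (cs.length - 3)] := by
      rw [rgroups, if_neg h3]
    have hz : PySem.Chars.zfill (cs.drop (cs.length - 3)) 3 = cs.drop (cs.length - 3) :=
      zfill_of_le _ _ (by simp [List.length_drop]; omega)
    simp only [hsplit, List.dropLast_concat, List.getLast_concat, hz]
    rw [flat_rgroups _ (by simp [List.ne_nil_iff_length_pos]; omega)]

-- the per-tile path: A's joined parts equal B's back-to-front built path
theorem perTile (n : Int) :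
    (PySem.Str.join "/" (int_to_parts n)).toList =
      bBuild (PySem.Chars.slice (PySem.Int.toChars n) none (some (-3)))
        (PySem.Chars.zfill (PySem.Chars.slice (PySem.Int.toChars n) (some (-3)) none) 3) := by
  have hcs : (PySem.Int.toStr n).toList = PySem.Int.toChars n := PySem.Int.toList_toStr n
  set cs := PySem.Int.toChars n with hcsdef
  have hne : cs ≠ [] := toChars_ne_nil n
  have hpos : 0 < cs.length := List.length_pos_iff.mpr hne
  -- B side
  rw [show PySem.Chars.slice cs none (some (-3)) = cs.take (cs.length - 3) by
        simp only [PySem.Chars.slice_eq_listSlice]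
        exact PySem.List.slice_to_neg_ofNat cs 3 (by omega),
      show PySem.Chars.slice cs (some (-3)) none = cs.drop (cs.length - 3) by
        simp only [PySem.Chars.slice_eq_listSlice]
        exact PySem.List.slice_from_neg_ofNat cs 3 (by omega),
      bBuild_eq, ← AB_core cs hne]
  -- A side
  unfold int_to_parts
  simp only []
  rw [PySem.Str.len_eq, hcs]
  have hW : PySem.Int.floordiv ((cs.length : Int) + 2) 3 * 3 = ((padW cs.length : Nat) : Int) := by
    rw [PySem.Int.floordiv_eq_ediv_of_pos (by omega),
      show ((cs.length : Int) + 2) = ((cs.length + 2 : Nat) : Int) by push_cast; ring,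
      show (3 : Int) = ((3 : Nat) : Int) by norm_cast, ← Int.natCast_ediv]
    unfold padW
    norm_cast
  rw [hW]
  have htl : (PySem.Str.zfill (PySem.Int.toStr n) ((padW cs.length : Nat) : Int)).toList
      = PySem.Chars.zfill cs ((padW cs.length : Nat) : Int) := by
    rw [PySem.Str.toList_zfill, hcs]
  have hlen : PySem.Str.len (PySem.Str.zfill (PySem.Int.toStr n) ((padW cs.length : Nat) : Int))
      = ((padW cs.length : Nat) : Int) := by
    rw [PySem.Str.len_eq, htl]
    norm_cast
    exact length_zfill_padW cs
  rw [hlen]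
  set tile_str := PySem.Str.zfill (PySem.Int.toStr n) ((padW cs.length : Nat) : Int) with htsdef
  set parts := (PySem.List.pyRange 0 ((padW cs.length : Nat) : Int) 3).map
      (fun j => PySem.Str.slice tile_str (some j) (some (j + 3))) with hpartsdef
  have hk : padW cs.length = 3 * ((cs.length + 2) / 3) := by unfold padW; omega
  have hmaps : parts.map String.toList = rgroups cs := by
    rw [hpartsdef, List.map_map, hk, pyRange03, List.map_map]
    have hstep : ∀ i : Nat,
        ((String.toList ∘ (fun j => PySem.Str.slice tile_str (some j) (some (j + 3)))) ∘
          (fun i : Nat => ((3 * i : Nat) : Int))) i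
          = (tile_str.toList.drop (3 * i)).take 3 := by
      intro i
      simp only [Function.comp_apply]
      rw [PySem.Str.toList_slice,
        show ((3 * i : Nat) : Int) + 3 = ((3 * i : Nat) : Int) + ((3 : Nat) : Int) by norm_cast,
        PySem.Chars.slice_eq_listSlice, PySem.List.slice_natCast_add]
    rw [List.map_congr_left (fun i _ => hstep i),
      mapSlice_eq_chunks3 _ _ (by rw [htl]; rw [length_zfill_padW, hk]),
      htl, ← chunks3_padded cs hne]
  have hpne : parts ≠ [] := by
    intro h0
    have := hmaps
    rw [h0] at this
    exact rgroups_ne_nil cs this.symm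
  rw [PySem.List.slice_to_neg_one, pyGet_neg_one parts hpne,
    List.getLast?_eq_some_getLast hpne, Option.getD_some, PySem.Str.toList_join]
  have hsep : (String.toList "/") = ['/'] := by decide
  have hx : ∀ p : String, ("x" ++ p).toList = 'x' :: p.toList := by
    intro p
    rw [String.toList_append]
    rfl
  rw [hsep, List.map_append, List.map_map]
  have hxmap : List.map (String.toList ∘ fun x => "x" ++ x) parts.dropLast
      = List.map (fun g => 'x' :: g) (List.map String.toList parts.dropLast) := by
    rw [List.map_map]
    exact List.map_congr_left fun p _ => hx p
  rw [hxmap, List.map_dropLast, hmaps]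
  have hlast : (parts.getLast hpne).toList = (rgroups cs).getLast (rgroups_ne_nil cs) := by
    have h1 : (parts.map String.toList).getLast? = parts.getLast?.map String.toList :=
      List.getLast?_map
    rw [hmaps, List.getLast?_eq_some_getLast hpne,
      List.getLast?_eq_some_getLast (rgroups_ne_nil cs)] at h1
    simpa using h1.symm
  rw [List.map_cons, List.map_nil, hlast, join_map_x]

-- ===== VERDICT (by name: the statement is the Claim_ definition above) =====
theorem get_data_tile_paths_spec : Claim_equal_get_data_tile_paths := by
  intro s e t c _
  unfold Spec_get_data_tile_paths get_data_tile_paths get_data_tile_paths_alt TILE_SIZE paths_in_level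
  simp only [ne_eq, not_true_eq_false, if_false, List.map_map]
  apply List.map_congr_left
  intro n _
  rw [String.ext_iff]
  simp only [Function.comp_apply, String.toList_append, String.toList_ofList, perTile]
  cases c <;> simp
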